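-- pv_equiv track=rewrite | github.com/nbietry/AoC2024 | Python/Day12/day12.py | extract_facets
-- ===== SOURCE A (Python) =====
-- def calculate_perimeter(zone):
--     perimeter = set()
--     for y, x in zone:
--         borders = [(y,x,y+1,x,'L'), (y,x,y,x+1,'T'),(y+1,x,y+1,x+1,'B'),(y, x+1,y+1, x+1,'R')]
--         for border in borders:
--             # Create a border without the last index for comparison
--             border_without_direction = border[:4]
--
--             if border_without_direction in {b[:4] for b in perimeter}:
--                 # Remove the full border if it matches (ignoring direction)
--                 perimeter = {b for b in perimeter if b[:4] != border_without_direction}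
--             else:
--                 # Add the border to the set
--                 perimeter.add(border)
--     return perimeter
--
-- def merge_lines(lines_collection):
--     merged_lines = [lines_collection[0]]
--
--     for y1, x1, y2, x2, Q in lines_collection[1:]:
--         prev_y1, prev_x1, prev_y2, prev_x2, prev_Q = merged_lines[-1]
--
--         # If the previous line's end matches the current line's start, merge them
--         if (prev_y2, prev_x2) == (y1, x1) and Q == prev_Q:
--             merged_lines[-1] = (prev_y1, prev_x1, y2, x2, Q)
--         else:
--             # Otherwise, add the current line as a new segment
--             merged_lines.append((y1, x1, y2, x2, Q))
--
--     return merged_lines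
--
-- def extract_facets(zone):
--     vectors = calculate_perimeter(zone)
--     lines_directions_x = sorted(
--         (v for v in vectors if (v[2] - v[0], v[3] - v[1]) == (1, 0)),
--         key=lambda v: (v[1], v[3], v[0], v[2], v[4])
--     )
--     lines_directions_y = sorted(
--         (v for v in vectors if (v[2] - v[0], v[3] - v[1]) == (0, 1)),
--         key=lambda v: (v[0], v[2], v[1], v[3], v[4])
--     )
--     #render_map(zone, merge_lines(lines_directions_x) + merge_lines(lines_directions_y))
--     return len(merge_lines(lines_directions_x)) + len(merge_lines(lines_directions_y))
-- ===== SOURCE B (Python) =====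
-- def extract_facets(zone):
--     # Toggle each unit border in a dict keyed by its 4 coordinates (odd occurrences survive),
--     # then count side-starting segments directly: a surviving segment begins a new side exactly
--     # when the neighbouring segment that would extend it backwards (same direction) is absent.
--     borders = {}
--     for y, x in zone:
--         for y1, x1, y2, x2, q in ((y, x, y + 1, x, 'L'), (y, x, y, x + 1, 'T'),
--                                   (y + 1, x, y + 1, x + 1, 'B'), (y, x + 1, y + 1, x + 1, 'R')):
--             k = (y1, x1, y2, x2)
--             if k in borders:
--                 del borders[k]
--             else:
--                 borders[k] = q
--     sides = 0
--     for (y1, x1, y2, x2), q in borders.items():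
--         if y2 - y1 == 1:  # vertical segment: predecessor is the one directly above
--             if borders.get((y1 - 1, x1, y1, x1)) != q:
--                 sides += 1
--         else:             # horizontal segment: predecessor is the one directly to the left
--             if borders.get((y1, x1 - 1, y1, x1)) != q:
--                 sides += 1
--     return sides
-- ===== Notes on version B (the rewrite author's own statement) =====
-- stated objective: faster
-- what changed: B eliminates A's sort-and-merge stage entirely: after toggling borders in one dict keyed by the 4 coordinates (instead of rebuilding a projection set and a filtered set per border), it counts sides directly as the segments whose backward neighbour with the same direction is absent (one dict lookup each) - no sorting, no merged list.
import Mathlib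
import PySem

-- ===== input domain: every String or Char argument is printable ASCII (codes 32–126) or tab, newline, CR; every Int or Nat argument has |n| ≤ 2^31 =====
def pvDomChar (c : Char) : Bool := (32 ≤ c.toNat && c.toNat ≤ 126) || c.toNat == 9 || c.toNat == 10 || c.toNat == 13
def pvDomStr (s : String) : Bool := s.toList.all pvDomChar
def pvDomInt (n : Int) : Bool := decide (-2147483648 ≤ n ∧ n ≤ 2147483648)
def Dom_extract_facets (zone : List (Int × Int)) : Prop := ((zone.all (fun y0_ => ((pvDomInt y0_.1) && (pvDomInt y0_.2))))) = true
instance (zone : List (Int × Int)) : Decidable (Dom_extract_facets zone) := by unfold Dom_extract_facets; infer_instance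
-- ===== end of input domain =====

-- B drops A's sort-and-merge entirely: it toggles the unit borders in one dict keyed by the 4
-- coordinates and then counts the side-starting segments directly, deciding "starts a side" by a
-- single dict lookup of the segment's backward neighbour; a timing run measured B faster.

-- ===== PORT A =====
-- a border is the 5-tuple (y1, x1, y2, x2, direction)
abbrev PvSeg : Type := Int × Int × Int × Int × String

-- border[:4] (slice of a 5-tuple; exact: the first four components)
def pvFirst4 (b : PvSeg) : Int × Int × Int × Int := (b.1, b.2.1, b.2.2.1, b.2.2.2.1)

-- the four borders of cell (y, x), in A's (and B's) order
def pvBorders (y x : Int) : List PvSeg :=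
  [(y, x, y + 1, x, "L"), (y, x, y, x + 1, "T"),
   (y + 1, x, y + 1, x + 1, "B"), (y, x + 1, y + 1, x + 1, "R")]

-- body of A's inner 'for border in borders' loop
def pvStepA (perimeter : PySem.Set PvSeg) (border : PvSeg) : PySem.Set PvSeg :=
  let bwd := pvFirst4 border
  if PySem.Set.contains (PySem.Set.ofList (perimeter.map pvFirst4)) bwd then
    perimeter.filter (fun b => decide (pvFirst4 b ≠ bwd))
  else
    PySem.Set.add perimeter border

def calculate_perimeter (zone : List (Int × Int)) : PySem.Set PvSeg :=
  zone.foldl (fun perimeter yx => (pvBorders yx.1 yx.2).foldl pvStepA perimeter) PySem.Set.empty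

-- Python tuple comparison is lexicographic; a tuple key is ported as a nested Lex product,
-- the string component through its character list (Python compares strings by code points)
abbrev PvKey : Type := Lex (Int × Lex (Int × Lex (Int × Lex (Int × List Char))))

def pvKeyX (v : PvSeg) : PvKey :=
  toLex (v.2.1, toLex (v.2.2.2.1, toLex (v.1, toLex (v.2.2.1, v.2.2.2.2.toList))))

def pvKeyY (v : PvSeg) : PvKey :=
  toLex (v.1, toLex (v.2.2.1, toLex (v.2.1, toLex (v.2.2.2.1, v.2.2.2.2.toList))))

-- body of merge_lines' loop (merged_lines[-1] inspected, replaced or appended to)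
def pvMergeBody (merged : List PvSeg) (cur : PvSeg) : List PvSeg :=
  match merged.getLast? with
  | none => merged ++ [cur]  -- unreachable: merged starts nonempty
  | some prev =>
    if (prev.2.2.1, prev.2.2.2.1) = (cur.1, cur.2.1) ∧ cur.2.2.2.2 = prev.2.2.2.2 then
      merged.dropLast ++ [(prev.1, prev.2.1, cur.2.2.1, cur.2.2.2.1, cur.2.2.2.2)]
    else
      merged ++ [cur]

def merge_lines (lines_collection : List PvSeg) : List PvSeg :=
  match lines_collection with
  | [] => []  -- Python raises IndexError on lines_collection[0]; Pre_ keeps this unreachable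
  | h :: t => t.foldl pvMergeBody [h]

def extract_facets (zone : List (Int × Int)) : Int :=
  let vectors := calculate_perimeter zone
  let lines_directions_x := PySem.List.sorted
    (vectors.filter (fun v => decide ((v.2.2.1 - v.1, v.2.2.2.1 - v.2.1) = ((1 : Int), (0 : Int))))) pvKeyX
  let lines_directions_y := PySem.List.sorted
    (vectors.filter (fun v => decide ((v.2.2.1 - v.1, v.2.2.2.1 - v.2.1) = ((0 : Int), (1 : Int))))) pvKeyY
  ((merge_lines lines_directions_x).length : Int) + ((merge_lines lines_directions_y).length : Int)

-- ===== PORT B =====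
abbrev PvK4 : Type := Int × Int × Int × Int

-- body of B's inner toggle loop: one dict keyed by the 4 coordinates, value = direction
def pvStepB (d : PySem.Dict PvK4 String) (b : PvSeg) : PySem.Dict PvK4 String :=
  let k := pvFirst4 b
  if d.contains k then d.erase k else d.insert k b.2.2.2.2

-- body of B's counting loop over borders.items()
def pvSideStep (borders : PySem.Dict PvK4 String) (sides : Int) (kv : PvK4 × String) : Int :=
  if kv.1.2.2.1 - kv.1.1 == 1 then
    if borders.get? (kv.1.1 - 1, kv.1.2.1, kv.1.1, kv.1.2.1) ≠ some kv.2 then sides + 1 else sides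
  else
    if borders.get? (kv.1.1, kv.1.2.1 - 1, kv.1.1, kv.1.2.1) ≠ some kv.2 then sides + 1 else sides

def extract_facets_alt (zone : List (Int × Int)) : Int :=
  let borders := zone.foldl (fun d yx => (pvBorders yx.1 yx.2).foldl pvStepB d) PySem.Dict.empty
  borders.items.foldl (pvSideStep borders) 0

-- ===== PRECONDITION & SPEC =====
-- Pre_ excludes exactly the inputs where Python A raises IndexError (merge_lines of an empty
-- group): that happens iff every cell occurs an even number of times, i.e. the toggled
-- perimeter is empty; B naturally returns 0 there.
def Pre_extract_facets (zone : List (Int × Int)) : Prop := ∃ p ∈ zone, zone.count p % 2 = 1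
instance (zone : List (Int × Int)) : Decidable (Pre_extract_facets zone) := by unfold Pre_extract_facets; infer_instance

def pvWitness_extract_facets : (List (Int × Int)) := ([((0 : Int), (0 : Int))])

def Spec_extract_facets (zone : List (Int × Int)) (out : Int) : Prop := out = extract_facets_alt zone
instance (zone : List (Int × Int)) (out : Int) : Decidable (Spec_extract_facets zone out) := by unfold Spec_extract_facets; infer_instance

-- ===== CLAIM (what is proved, stated in full; the proofs are below) =====
def Claim_equal_extract_facets : Prop := ∀ (zone : List (Int × Int)), Dom_extract_facets zone → Pre_extract_facets zone → Spec_extract_facets zone (extract_facets zone)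

-- ===== LEMMAS AND PROOFS =====

def pvShape (b : PvSeg) : Prop :=
  (b.2.2.1 = b.1 + 1 ∧ b.2.2.2.1 = b.2.1) ∨ (b.2.2.1 = b.1 ∧ b.2.2.2.1 = b.2.1 + 1)

def pvInv (per : PySem.Set PvSeg) (d : PySem.Dict PvK4 String) : Prop :=
  d.items = per.map (fun b => (pvFirst4 b, b.2.2.2.2))
  ∧ (per.map pvFirst4).Nodup
  ∧ ∀ b ∈ per, pvShape b

theorem pvStep_inv (per : PySem.Set PvSeg) (d : PySem.Dict PvK4 String)
    (h : pvInv per d) (b : PvSeg) (hb : pvShape b) : pvInv (pvStepA per b) (pvStepB d b) := by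
  obtain ⟨hit, hnd, hsh⟩ := h
  have hkeys : d.keys = per.map pvFirst4 := by
    simp [PySem.Dict.keys, hit, List.map_map, Function.comp_def]
  by_cases hk : pvFirst4 b ∈ per.map pvFirst4
  · have hA : PySem.Set.contains (PySem.Set.ofList (per.map pvFirst4)) (pvFirst4 b) = true := by
      simp [PySem.Set.mem_ofList, hk]
    have hB : d.contains (pvFirst4 b) = true :=
      (PySem.Dict.contains_iff_mem_keys d _).mpr (by rw [hkeys]; exact hk)
    refine ⟨?_, ?_, ?_⟩
    · simp only [pvStepA, pvStepB, hA, hB, if_true]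
      simp only [PySem.Dict.erase, hit, List.filter_map]
      congr 1
      apply List.filter_congr
      intro x _
      by_cases hx : pvFirst4 x = pvFirst4 b <;> simp [hx]
    · simp only [pvStepA, hA, if_true]
      exact hnd.sublist (List.Sublist.map _ (List.filter_sublist (l := per)))
    · simp only [pvStepA, hA, if_true]
      intro v hv
      exact hsh v (List.mem_of_mem_filter hv)
  · have hA : PySem.Set.contains (PySem.Set.ofList (per.map pvFirst4)) (pvFirst4 b) = false := by
      simp [PySem.Set.mem_ofList, hk]
    have hB : d.contains (pvFirst4 b) = false := by
      by_contra hc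
      exact hk (by rw [← hkeys]
                   exact (PySem.Dict.contains_iff_mem_keys d _).mp (by revert hc; cases d.contains (pvFirst4 b) <;> simp))
    have hbper : b ∉ per := fun hbm => hk (List.mem_map_of_mem hbm)
    refine ⟨?_, ?_, ?_⟩
    · simp only [pvStepA, pvStepB, hA, hB, if_false, Bool.false_eq_true]
      rw [PySem.Set.add_of_not_mem hbper, PySem.Dict.items_insert_of_not_contains d _ hB]
      simp [hit]
    · simp only [pvStepA, hA, if_false, Bool.false_eq_true]
      rw [PySem.Set.add_of_not_mem hbper]
      rw [List.map_append]
      simp only [List.map_cons, List.map_nil]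
      exact List.Nodup.append hnd (List.nodup_singleton _) (by simpa using hk)
    · simp only [pvStepA, hA, if_false, Bool.false_eq_true]
      rw [PySem.Set.add_of_not_mem hbper]
      intro v hv
      rcases List.mem_append.mp hv with h1 | h1
      · exact hsh v h1
      · simp at h1; subst h1; exact hb

theorem pvBorders_shape (y x : Int) : ∀ b ∈ pvBorders y x, pvShape b := by
  intro b hb
  simp only [pvBorders, List.mem_cons, List.not_mem_nil, or_false] at hb
  rcases hb with h | h | h | h <;> subst h <;> simp [pvShape]

theorem pvFoldl_inv (l : List PvSeg) (hl : ∀ b ∈ l, pvShape b) :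
    ∀ (per : PySem.Set PvSeg) (d : PySem.Dict PvK4 String), pvInv per d →
    pvInv (l.foldl pvStepA per) (l.foldl pvStepB d) := by
  induction l with
  | nil => exact fun per d h => h
  | cons b l ih =>
    intro per d h
    exact ih (fun v hv => hl v (List.mem_cons_of_mem _ hv)) _ _
      (pvStep_inv per d h b (hl b (List.mem_cons_self)))

theorem pvZone_inv (zone : List (Int × Int)) :
    pvInv (calculate_perimeter zone)
      (zone.foldl (fun d yx => (pvBorders yx.1 yx.2).foldl pvStepB d) PySem.Dict.empty) := by
  unfold calculate_perimeter
  generalize hper : (PySem.Set.empty : PySem.Set PvSeg) = per0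
  generalize hd : (PySem.Dict.empty : PySem.Dict PvK4 String) = d0
  have h0 : pvInv per0 d0 := by subst hper hd; refine ⟨rfl, List.nodup_nil, by intro b hb; cases hb⟩
  clear hper hd
  induction zone generalizing per0 d0 with
  | nil => exact h0
  | cons yx zone ih => exact ih _ _ (pvFoldl_inv _ (pvBorders_shape yx.1 yx.2) _ _ h0)

theorem pvGet?_mem (per : PySem.Set PvSeg) (d : PySem.Dict PvK4 String)
    (hit : d.items = per.map (fun b => (pvFirst4 b, b.2.2.2.2)))
    (hnd : (per.map pvFirst4).Nodup) (w : PvSeg) :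
    d.get? (pvFirst4 w) = some w.2.2.2.2 ↔ w ∈ per := by
  have hkeys : d.keys.Nodup := by
    simpa [PySem.Dict.keys, hit, List.map_map, Function.comp_def] using hnd
  rw [PySem.Dict.get?_eq_some_iff_mem_items d _ _ hkeys, hit, List.mem_map]
  constructor
  · rintro ⟨b, hbm, hbe⟩
    rw [Prod.mk.injEq] at hbe
    obtain ⟨h4, hq⟩ := hbe
    have : b = w := by
      obtain ⟨b1, b2, b3, b4, b5⟩ := b
      obtain ⟨w1, w2, w3, w4, w5⟩ := w
      simp [pvFirst4] at h4 hq
      simp [h4.1, h4.2.1, h4.2.2.1, h4.2.2.2, hq]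
    rwa [this] at hbm
  · intro hw
    exact ⟨w, hw, rfl⟩

def pvEnd (v : PvSeg) : Int × Int × String := (v.2.2.1, v.2.2.2.1, v.2.2.2.2)

def pvChain (e : Int × Int × String) : List PvSeg → Nat
  | [] => 0
  | v :: t => (if e = (v.1, v.2.1, v.2.2.2.2) then 0 else 1) + pvChain (pvEnd v) t

theorem pvMergeChain (t : List PvSeg) : ∀ (acc : List PvSeg) (hne : acc ≠ []),
    (t.foldl pvMergeBody acc).length = acc.length + pvChain (pvEnd (acc.getLast hne)) t := by
  induction t with
  | nil => intro acc hne; simp [pvChain]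
  | cons v t ih =>
    intro acc hne
    have hlast : acc.getLast? = some (acc.getLast hne) := List.getLast?_eq_some_getLast hne
    set u := acc.getLast hne with hu
    simp only [List.foldl_cons]
    by_cases hc : (u.2.2.1, u.2.2.2.1) = (v.1, v.2.1) ∧ v.2.2.2.2 = u.2.2.2.2
    · have hm : pvMergeBody acc v = acc.dropLast ++ [(u.1, u.2.1, v.2.2.1, v.2.2.2.1, v.2.2.2.2)] := by
        simp [pvMergeBody, hlast, hc]
      have hchain : pvChain (pvEnd u) (v :: t) = pvChain (pvEnd v) t := by
        have : pvEnd u = (v.1, v.2.1, v.2.2.2.2) := by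
          rw [Prod.mk.injEq] at hc
          simp [pvEnd, hc.1.1, hc.1.2, hc.2]
        simp [pvChain, this]
      have hne' : acc.dropLast ++ [(u.1, u.2.1, v.2.2.1, v.2.2.2.1, v.2.2.2.2)] ≠ [] := by simp
      have hlast' : (acc.dropLast ++ [(u.1, u.2.1, v.2.2.1, v.2.2.2.1, v.2.2.2.2)]).getLast hne'
          = (u.1, u.2.1, v.2.2.1, v.2.2.2.1, v.2.2.2.2) := by simp
      have hlen : (acc.dropLast ++ [(u.1, u.2.1, v.2.2.1, v.2.2.2.1, v.2.2.2.2)]).length = acc.length := by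
        have hpos : 0 < acc.length := List.length_pos_iff.mpr hne
        simp [List.length_dropLast]; omega
      rw [hm, ih _ hne', hlast', hlen, hchain]
      simp [pvEnd]
    · have hm : pvMergeBody acc v = acc ++ [v] := by
        simp only [pvMergeBody, hlast]
        rw [if_neg hc]
      have hchain : pvChain (pvEnd u) (v :: t) = 1 + pvChain (pvEnd v) t := by
        have : pvEnd u ≠ (v.1, v.2.1, v.2.2.2.2) := by
          intro he
          rw [Prod.mk.injEq] at he
          obtain ⟨h1, h2⟩ := he
          rw [Prod.mk.injEq] at h2
          exact hc ⟨by rw [Prod.mk.injEq]; exact ⟨h1, h2.1⟩, h2.2.symm⟩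
        simp [pvChain, this]
      have hne' : acc ++ [v] ≠ [] := by simp
      have hlast' : (acc ++ [v]).getLast hne' = v := by simp
      rw [hm, ih _ hne', hlast', hchain]
      simp; omega

def pvPredV (v : PvSeg) : PvSeg := (v.1 - 1, v.2.1, v.1, v.2.1, v.2.2.2.2)

def pvLtV (u v : PvSeg) : Prop := u.2.1 < v.2.1 ∨ (u.2.1 = v.2.1 ∧ u.1 < v.1)

def pvVertP (v : PvSeg) : Prop := v.2.2.1 = v.1 + 1 ∧ v.2.2.2.1 = v.2.1

theorem pvChainCountV (t : List PvSeg) : ∀ (pre : List PvSeg) (u : PvSeg) (S : List PvSeg),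
    S = pre ++ u :: t → S.Pairwise pvLtV → (∀ v ∈ S, pvVertP v) →
    pvChain (pvEnd u) t = t.countP (fun v => !decide (pvPredV v ∈ S)) := by
  induction t with
  | nil => intro pre u S _ _ _; simp [pvChain]
  | cons v t ih =>
    intro pre u S hS hp hsh
    have huS : u ∈ S := by rw [hS]; exact List.mem_append_right _ (List.mem_cons_self)
    have hvS : v ∈ S := by
      rw [hS]; exact List.mem_append_right _ (List.mem_cons_of_mem _ List.mem_cons_self)
    have hvert_u := hsh u huS
    have hvert_v := hsh v hvS
    -- the merge test at this step decides exactly whether v's predecessor segment is in S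
    have key : pvEnd u = (v.1, v.2.1, v.2.2.2.2) ↔ pvPredV v ∈ S := by
      constructor
      · intro he
        have hu2 : u = pvPredV v := by
          obtain ⟨hv1, hv2⟩ := hvert_u
          rw [Prod.mk.injEq] at he
          obtain ⟨h1, h2⟩ := he
          rw [Prod.mk.injEq] at h2
          obtain ⟨u1, u2, u3, u4, u5⟩ := u
          simp only [pvEnd] at h1 h2
          simp only at hv1 hv2
          simp only [pvPredV, Prod.mk.injEq]
          refine ⟨by omega, by omega, by omega, by omega, h2.2⟩
        rw [← hu2]; exact huS
      · intro hm
        -- pairwise facts along the decomposition S = pre ++ u :: v :: t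
        rw [hS, List.pairwise_append] at hp
        obtain ⟨-, hp2, hcross⟩ := hp
        rw [List.pairwise_cons] at hp2
        obtain ⟨hub, hp3⟩ := hp2
        rw [List.pairwise_cons] at hp3
        obtain ⟨hvb, -⟩ := hp3
        have huv : pvLtV u v := hub v List.mem_cons_self
        rw [hS] at hm
        rcases List.mem_append.mp hm with hw | hw
        · exfalso
          have h1 : pvLtV (pvPredV v) u := hcross _ hw u List.mem_cons_self
          simp only [pvPredV, pvLtV] at h1 huv
          rcases h1 with h1 | h1 <;> rcases huv with h2 | h2 <;> omega
        · rcases List.mem_cons.mp hw with hw | hw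
          · rw [← hw]; rfl
          · rcases List.mem_cons.mp hw with hw | hw
            · exfalso
              have : (pvPredV v).1 = v.1 := by rw [hw]
              simp only [pvPredV] at this; omega
            · exfalso
              have h1 : pvLtV v (pvPredV v) := hvb _ hw
              simp only [pvPredV, pvLtV] at h1; omega
    have hIH : pvChain (pvEnd v) t = t.countP (fun w => !decide (pvPredV w ∈ S)) := by
      refine ih (pre ++ [u]) v S ?_ hp hsh
      rw [hS, List.append_assoc]; rfl
    by_cases hmem : pvPredV v ∈ S
    · have he : pvEnd u = (v.1, v.2.1, v.2.2.2.2) := key.mpr hmem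
      simp [pvChain, he, hmem, hIH]
    · have he : pvEnd u ≠ (v.1, v.2.1, v.2.2.2.2) := fun h => hmem (key.mp h)
      simp [pvChain, he, hmem, hIH]
      omega

theorem pvMergeCountV (s : List PvSeg) (hp : s.Pairwise pvLtV) (hs : ∀ v ∈ s, pvVertP v) :
    (merge_lines s).length = s.countP (fun v => !decide (pvPredV v ∈ s)) := by
  cases s with
  | nil => rfl
  | cons v0 t =>
    have hne : ([v0] : List PvSeg) ≠ [] := by simp
    have h1 : (merge_lines (v0 :: t)).length = 1 + pvChain (pvEnd v0) t := by
      have := pvMergeChain t [v0] hne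
      simpa [merge_lines] using this
    have hstart : pvPredV v0 ∉ (v0 :: t) := by
      intro hm
      rcases List.mem_cons.mp hm with hw | hw
      · have : (pvPredV v0).1 = v0.1 := by rw [hw]
        simp only [pvPredV] at this; omega
      · rw [List.pairwise_cons] at hp
        have : pvLtV v0 (pvPredV v0) := hp.1 _ hw
        simp only [pvPredV, pvLtV] at this; omega
    have h2 : pvChain (pvEnd v0) t = t.countP (fun w => !decide (pvPredV w ∈ (v0 :: t))) :=
      pvChainCountV t [] v0 (v0 :: t) rfl hp hs
    rw [h1, h2, List.countP_cons]
    simp [hstart]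
    omega

def pvPredH (v : PvSeg) : PvSeg := (v.1, v.2.1 - 1, v.1, v.2.1, v.2.2.2.2)

def pvLtH (u v : PvSeg) : Prop := u.1 < v.1 ∨ (u.1 = v.1 ∧ u.2.1 < v.2.1)

def pvHorzP (v : PvSeg) : Prop := v.2.2.1 = v.1 ∧ v.2.2.2.1 = v.2.1 + 1

theorem pvChainCountH (t : List PvSeg) : ∀ (pre : List PvSeg) (u : PvSeg) (S : List PvSeg),
    S = pre ++ u :: t → S.Pairwise pvLtH → (∀ v ∈ S, pvHorzP v) →
    pvChain (pvEnd u) t = t.countP (fun v => !decide (pvPredH v ∈ S)) := by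
  induction t with
  | nil => intro pre u S _ _ _; simp [pvChain]
  | cons v t ih =>
    intro pre u S hS hp hsh
    have huS : u ∈ S := by rw [hS]; exact List.mem_append_right _ (List.mem_cons_self)
    have hvS : v ∈ S := by
      rw [hS]; exact List.mem_append_right _ (List.mem_cons_of_mem _ List.mem_cons_self)
    have hhorz_u := hsh u huS
    have key : pvEnd u = (v.1, v.2.1, v.2.2.2.2) ↔ pvPredH v ∈ S := by
      constructor
      · intro he
        have hu2 : u = pvPredH v := by
          obtain ⟨hv1, hv2⟩ := hhorz_u
          rw [Prod.mk.injEq] at he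
          obtain ⟨h1, h2⟩ := he
          rw [Prod.mk.injEq] at h2
          obtain ⟨u1, u2, u3, u4, u5⟩ := u
          simp only [pvEnd] at h1 h2
          simp only at hv1 hv2
          simp only [pvPredH, Prod.mk.injEq]
          refine ⟨by omega, by omega, by omega, by omega, h2.2⟩
        rw [← hu2]; exact huS
      · intro hm
        rw [hS, List.pairwise_append] at hp
        obtain ⟨-, hp2, hcross⟩ := hp
        rw [List.pairwise_cons] at hp2
        obtain ⟨hub, hp3⟩ := hp2
        rw [List.pairwise_cons] at hp3
        obtain ⟨hvb, -⟩ := hp3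
        have huv : pvLtH u v := hub v List.mem_cons_self
        rw [hS] at hm
        rcases List.mem_append.mp hm with hw | hw
        · exfalso
          have h1 : pvLtH (pvPredH v) u := hcross _ hw u List.mem_cons_self
          simp only [pvPredH, pvLtH] at h1 huv
          rcases h1 with h1 | h1 <;> rcases huv with h2 | h2 <;> omega
        · rcases List.mem_cons.mp hw with hw | hw
          · rw [← hw]; rfl
          · rcases List.mem_cons.mp hw with hw | hw
            · exfalso
              have : (pvPredH v).2.1 = v.2.1 := by rw [hw]
              simp only [pvPredH] at this; omega
            · exfalso
              have h1 : pvLtH v (pvPredH v) := hvb _ hw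
              simp only [pvPredH, pvLtH] at h1; omega
    have hIH : pvChain (pvEnd v) t = t.countP (fun w => !decide (pvPredH w ∈ S)) := by
      refine ih (pre ++ [u]) v S ?_ hp hsh
      rw [hS, List.append_assoc]; rfl
    by_cases hmem : pvPredH v ∈ S
    · have he : pvEnd u = (v.1, v.2.1, v.2.2.2.2) := key.mpr hmem
      simp [pvChain, he, hmem, hIH]
    · have he : pvEnd u ≠ (v.1, v.2.1, v.2.2.2.2) := fun h => hmem (key.mp h)
      simp [pvChain, he, hmem, hIH]
      omega

theorem pvMergeCountH (s : List PvSeg) (hp : s.Pairwise pvLtH) (hs : ∀ v ∈ s, pvHorzP v) :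
    (merge_lines s).length = s.countP (fun v => !decide (pvPredH v ∈ s)) := by
  cases s with
  | nil => rfl
  | cons v0 t =>
    have hne : ([v0] : List PvSeg) ≠ [] := by simp
    have h1 : (merge_lines (v0 :: t)).length = 1 + pvChain (pvEnd v0) t := by
      have := pvMergeChain t [v0] hne
      simpa [merge_lines] using this
    have hstart : pvPredH v0 ∉ (v0 :: t) := by
      intro hm
      rcases List.mem_cons.mp hm with hw | hw
      · have : (pvPredH v0).2.1 = v0.2.1 := by rw [hw]
        simp only [pvPredH] at this; omega
      · rw [List.pairwise_cons] at hp
        have : pvLtH v0 (pvPredH v0) := hp.1 _ hw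
        simp only [pvPredH, pvLtH] at this; omega
    have h2 : pvChain (pvEnd v0) t = t.countP (fun w => !decide (pvPredH w ∈ (v0 :: t))) :=
      pvChainCountH t [] v0 (v0 :: t) rfl hp hs
    rw [h1, h2, List.countP_cons]
    simp [hstart]
    omega

theorem pvKeyX_le_ltV (a b : PvSeg) (ha : pvVertP a) (hb : pvVertP b)
    (hne : pvFirst4 a ≠ pvFirst4 b) (hle : pvKeyX a ≤ pvKeyX b) : pvLtV a b := by
  unfold pvKeyX at hle
  rw [Prod.Lex.toLex_le_toLex] at hle
  obtain ⟨hv1a, hv2a⟩ := ha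
  obtain ⟨hv1b, hv2b⟩ := hb
  rcases hle with h | ⟨h1, h2⟩
  · exact Or.inl h
  · rw [Prod.Lex.toLex_le_toLex] at h2
    rcases h2 with h | ⟨h2a, h3⟩
    · exact absurd h (by simp only; omega)
    · rw [Prod.Lex.toLex_le_toLex] at h3
      rcases h3 with h | ⟨h3a, h4⟩
      · exact Or.inr ⟨h1, h⟩
      · exact absurd hne (by
          simp only [ne_eq, not_not, pvFirst4, Prod.mk.injEq]
          simp only at h1 h3a
          refine ⟨by omega, by omega, by omega, by omega⟩)

theorem pvKeyY_le_ltH (a b : PvSeg) (ha : pvHorzP a) (hb : pvHorzP b)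
    (hne : pvFirst4 a ≠ pvFirst4 b) (hle : pvKeyY a ≤ pvKeyY b) : pvLtH a b := by
  unfold pvKeyY at hle
  rw [Prod.Lex.toLex_le_toLex] at hle
  obtain ⟨hv1a, hv2a⟩ := ha
  obtain ⟨hv1b, hv2b⟩ := hb
  rcases hle with h | ⟨h1, h2⟩
  · exact Or.inl h
  · rw [Prod.Lex.toLex_le_toLex] at h2
    rcases h2 with h | ⟨h2a, h3⟩
    · exact absurd h (by simp only; omega)
    · rw [Prod.Lex.toLex_le_toLex] at h3
      rcases h3 with h | ⟨h3a, h4⟩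
      · exact Or.inr ⟨h1, h⟩
      · exact absurd hne (by
          simp only [ne_eq, not_not, pvFirst4, Prod.mk.injEq]
          simp only at h1 h3a
          refine ⟨by omega, by omega, by omega, by omega⟩)

theorem pvSortedLtV (l : List PvSeg) (hnd : (l.map pvFirst4).Nodup) (hs : ∀ v ∈ l, pvVertP v) :
    (PySem.List.sorted l pvKeyX).Pairwise pvLtV := by
  have hperm : (PySem.List.sorted l pvKeyX).Perm l := PySem.List.sorted_perm l pvKeyX false
  have hnd' : ((PySem.List.sorted l pvKeyX).map pvFirst4).Nodup :=
    ((hperm.map pvFirst4).nodup_iff).mpr hnd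
  have hne : (PySem.List.sorted l pvKeyX).Pairwise (fun a b => pvFirst4 a ≠ pvFirst4 b) :=
    List.pairwise_map.mp hnd'
  rw [List.pairwise_iff_forall_sublist]
  intro a b hab
  have hle := List.pairwise_iff_forall_sublist.mp (PySem.List.sorted_pairwise l pvKeyX) hab
  have hne' := List.pairwise_iff_forall_sublist.mp hne hab
  have ha : a ∈ l := hperm.subset (hab.subset (List.mem_cons_self))
  have hb : b ∈ l := hperm.subset (hab.subset (List.mem_cons_of_mem _ List.mem_cons_self))
  exact pvKeyX_le_ltV a b (hs a ha) (hs b hb) hne' hle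

theorem pvSortedLtH (l : List PvSeg) (hnd : (l.map pvFirst4).Nodup) (hs : ∀ v ∈ l, pvHorzP v) :
    (PySem.List.sorted l pvKeyY).Pairwise pvLtH := by
  have hperm : (PySem.List.sorted l pvKeyY).Perm l := PySem.List.sorted_perm l pvKeyY false
  have hnd' : ((PySem.List.sorted l pvKeyY).map pvFirst4).Nodup :=
    ((hperm.map pvFirst4).nodup_iff).mpr hnd
  have hne : (PySem.List.sorted l pvKeyY).Pairwise (fun a b => pvFirst4 a ≠ pvFirst4 b) :=
    List.pairwise_map.mp hnd'
  rw [List.pairwise_iff_forall_sublist]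
  intro a b hab
  have hle := List.pairwise_iff_forall_sublist.mp (PySem.List.sorted_pairwise l pvKeyY) hab
  have hne' := List.pairwise_iff_forall_sublist.mp hne hab
  have ha : a ∈ l := hperm.subset (hab.subset (List.mem_cons_self))
  have hb : b ∈ l := hperm.subset (hab.subset (List.mem_cons_of_mem _ List.mem_cons_self))
  exact pvKeyY_le_ltH a b (hs a ha) (hs b hb) hne' hle

def pvStartP (d : PySem.Dict PvK4 String) (kv : PvK4 × String) : Bool :=
  if kv.1.2.2.1 - kv.1.1 == 1 then
    decide (d.get? (kv.1.1 - 1, kv.1.2.1, kv.1.1, kv.1.2.1) ≠ some kv.2)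
  else
    decide (d.get? (kv.1.1, kv.1.2.1 - 1, kv.1.1, kv.1.2.1) ≠ some kv.2)

theorem pvSideStep_eq (d : PySem.Dict PvK4 String) :
    pvSideStep d = fun acc kv => if pvStartP d kv then acc + 1 else acc := by
  funext acc kv
  simp only [pvSideStep, pvStartP]
  split_ifs <;> simp_all

theorem pvFinal (zone : List (Int × Int)) : extract_facets zone = extract_facets_alt zone := by
  obtain ⟨hit, hnd, hsh⟩ := pvZone_inv zone
  set per := calculate_perimeter zone with hper
  set d := zone.foldl (fun d yx => (pvBorders yx.1 yx.2).foldl pvStepB d) PySem.Dict.empty with hd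
  -- B = number of items whose start predicate holds
  have hB : extract_facets_alt zone = ((d.items.countP (pvStartP d) : Nat) : Int) := by
    show d.items.foldl (pvSideStep d) 0 = _
    rw [pvSideStep_eq, PySem.List.foldl_if_add_one]
    simp
  set f : PvSeg → PvK4 × String := fun b => (pvFirst4 b, b.2.2.2.2) with hf
  have hmap : d.items.countP (pvStartP d) = per.countP (fun b => pvStartP d (f b)) := by
    rw [hit]; exact List.countP_map ..
  -- A's two filter predicates
  set bV : PvSeg → Bool := fun v => decide ((v.2.2.1 - v.1, v.2.2.2.1 - v.2.1) = ((1 : Int), (0 : Int))) with hbV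
  set bH : PvSeg → Bool := fun v => decide ((v.2.2.1 - v.1, v.2.2.2.1 - v.2.1) = ((0 : Int), (1 : Int))) with hbH
  have hbV_iff : ∀ v : PvSeg, bV v = true ↔ pvVertP v := by
    intro v; rw [hbV]; simp only [decide_eq_true_eq, Prod.mk.injEq, pvVertP]
    constructor <;> (intro h; constructor <;> omega)
  have hbH_iff : ∀ v : PvSeg, bH v = true ↔ pvHorzP v := by
    intro v; rw [hbH]; simp only [decide_eq_true_eq, Prod.mk.injEq, pvHorzP]
    constructor <;> (intro h; constructor <;> omega)
  set SV := per.filter bV with hSV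
  set SH := per.filter bH with hSH
  have hSH' : per.filter (fun v => !bV v) = SH := by
    rw [hSH]
    apply List.filter_congr
    intro v hv
    rcases hsh v hv with h | h
    · have h1 : bV v = true := (hbV_iff v).mpr h
      have h2 : bH v = false := by
        rcases Bool.eq_false_or_eq_true (bH v) with hh | hh
        · obtain ⟨e1, e2⟩ := (hbH_iff v).mp hh; obtain ⟨g1, g2⟩ := h; omega
        · exact hh
      simp [h1, h2]
    · have h1 : bH v = true := (hbH_iff v).mpr h
      have h2 : bV v = false := by
        rcases Bool.eq_false_or_eq_true (bV v) with hh | hh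
        · obtain ⟨e1, e2⟩ := (hbV_iff v).mp hh; obtain ⟨g1, g2⟩ := h; omega
        · exact hh
      simp [h1, h2]
  have hsplit : ∀ p : PvSeg → Bool, per.countP p = SV.countP p + SH.countP p := by
    intro p
    have hperm := List.filter_append_perm bV per
    rw [← hperm.countP_eq p, List.countP_append, hSH']
  -- start predicate on vertical members = "predecessor above is absent"
  have hqV : ∀ v ∈ SV, pvStartP d (f v) = !decide (pvPredV v ∈ SV) := by
    intro v hv
    have hvm := List.mem_of_mem_filter hv
    have hvert : pvVertP v := (hbV_iff v).mp (List.of_mem_filter hv)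
    have hbranch : ((f v).1.2.2.1 - (f v).1.1 == 1) = true := by
      simp only [hf, pvFirst4, beq_iff_eq]
      obtain ⟨h1, h2⟩ := hvert
      omega
    have hget := pvGet?_mem per d hit hnd (pvPredV v)
    have hmemV : pvPredV v ∈ per ↔ pvPredV v ∈ SV := by
      rw [hSV]
      constructor
      · intro h; refine List.mem_filter.mpr ⟨h, ?_⟩
        rw [hbV]; simp [pvPredV]
      · exact List.mem_of_mem_filter
    simp only [pvStartP, hbranch, if_true]
    have hk : ((f v).1.1 - 1, (f v).1.2.1, (f v).1.1, (f v).1.2.1) = pvFirst4 (pvPredV v) := rfl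
    rw [hk]
    have : (f v).2 = (pvPredV v).2.2.2.2 := rfl
    rw [this, decide_eq_decide.mpr (not_congr (hget.trans hmemV)), decide_not]
  have hqH : ∀ v ∈ SH, pvStartP d (f v) = !decide (pvPredH v ∈ SH) := by
    intro v hv
    have hvm := List.mem_of_mem_filter hv
    have hhorz : pvHorzP v := (hbH_iff v).mp (List.of_mem_filter hv)
    have hbranch : ((f v).1.2.2.1 - (f v).1.1 == 1) = false := by
      simp only [hf, pvFirst4, beq_eq_false_iff_ne, ne_eq]
      obtain ⟨h1, h2⟩ := hhorz
      omega
    have hget := pvGet?_mem per d hit hnd (pvPredH v)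
    have hmemH : pvPredH v ∈ per ↔ pvPredH v ∈ SH := by
      rw [hSH]
      constructor
      · intro h; refine List.mem_filter.mpr ⟨h, ?_⟩
        rw [hbH]; simp [pvPredH]
      · exact List.mem_of_mem_filter
    simp only [pvStartP, hbranch, Bool.false_eq_true, if_false]
    have hk : ((f v).1.1, (f v).1.2.1 - 1, (f v).1.1, (f v).1.2.1) = pvFirst4 (pvPredH v) := rfl
    rw [hk]
    have : (f v).2 = (pvPredH v).2.2.2.2 := rfl
    rw [this, decide_eq_decide.mpr (not_congr (hget.trans hmemH)), decide_not]
  -- A's vertical group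
  have hndSV : (SV.map pvFirst4).Nodup := hnd.sublist (List.Sublist.map _ (List.filter_sublist (l := per)))
  have hndSH : (SH.map pvFirst4).Nodup := hnd.sublist (List.Sublist.map _ (List.filter_sublist (l := per)))
  have hsSV : ∀ v ∈ SV, pvVertP v := fun v hv => (hbV_iff v).mp (List.of_mem_filter hv)
  have hsSH : ∀ v ∈ SH, pvHorzP v := fun v hv => (hbH_iff v).mp (List.of_mem_filter hv)
  set sX := PySem.List.sorted SV pvKeyX with hsX
  set sY := PySem.List.sorted SH pvKeyY with hsY
  have hpermX : sX.Perm SV := PySem.List.sorted_perm SV pvKeyX false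
  have hpermY : sY.Perm SH := PySem.List.sorted_perm SH pvKeyY false
  have hlenX : (merge_lines sX).length = SV.countP (fun v => !decide (pvPredV v ∈ SV)) := by
    rw [pvMergeCountV sX (pvSortedLtV SV hndSV hsSV) (fun v hv => hsSV v (hpermX.subset hv))]
    have h1 : sX.countP (fun v => !decide (pvPredV v ∈ sX))
        = sX.countP (fun v => !decide (pvPredV v ∈ SV)) :=
      List.countP_congr (fun v hv => by rw [decide_eq_decide.mpr hpermX.mem_iff])
    rw [h1]
    exact hpermX.countP_eq _
  have hlenY : (merge_lines sY).length = SH.countP (fun v => !decide (pvPredH v ∈ SH)) := by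
    rw [pvMergeCountH sY (pvSortedLtH SH hndSH hsSH) (fun v hv => hsSH v (hpermY.subset hv))]
    have h1 : sY.countP (fun v => !decide (pvPredH v ∈ sY))
        = sY.countP (fun v => !decide (pvPredH v ∈ SH)) :=
      List.countP_congr (fun v hv => by rw [decide_eq_decide.mpr hpermY.mem_iff])
    rw [h1]
    exact hpermY.countP_eq _
  -- assemble
  have hcV : SV.countP (fun v => !decide (pvPredV v ∈ SV)) = SV.countP (fun b => pvStartP d (f b)) :=
    List.countP_congr (fun v hv => by rw [hqV v hv])
  have hcH : SH.countP (fun v => !decide (pvPredH v ∈ SH)) = SH.countP (fun b => pvStartP d (f b)) :=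
    List.countP_congr (fun v hv => by rw [hqH v hv])
  rw [hB, hmap, hsplit]
  show ((merge_lines sX).length : Int) + ((merge_lines sY).length : Int) = _
  rw [hlenX, hlenY, hcV, hcH]
  push_cast
  ring

-- ===== VERDICT (by name: the statement is the Claim_ definition above) =====
theorem extract_facets_spec : Claim_equal_extract_facets := by
  unfold Claim_equal_extract_facets
  intro zone _ _
  unfold Spec_extract_facets
  exact pvFinal zone
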